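-- pv_equiv track=rewrite | github.com/danielwun/projects | ML/Face classification/Generative.py | Error
-- ===== SOURCE A (Python) =====
-- def Error(ans) :
--     num = 0 ;
--     error = 0 ;
--     for data in ans :
--         if num<100 :
--             if data[0] != 1:
--                 error = error+1 ;
--         elif num<200:
--             if data[1] != 1:
--                 error = error+1 ;
--         else :
--             if data[2] != 1:
--                 error = error+1 ;
--         num = num+1 ;
--     return error
-- ===== SOURCE B (Python) =====
-- def Error(ans):
--     wrong = len(ans)
--     for col, block in enumerate((ans[:100], ans[100:200], ans[200:])):
--         wrong -= [row[col] for row in block].count(1)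
--     return wrong
-- ===== Notes on version B (the rewrite author's own statement) =====
-- stated objective: alternative
-- what changed: Counts by complement: partitions ans into its three fixed regions, projects each region onto its expected column, counts the correct entries with list.count(1), and subtracts from len(ans) - no running index, no inequality test, no per-row branch.
import Mathlib
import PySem

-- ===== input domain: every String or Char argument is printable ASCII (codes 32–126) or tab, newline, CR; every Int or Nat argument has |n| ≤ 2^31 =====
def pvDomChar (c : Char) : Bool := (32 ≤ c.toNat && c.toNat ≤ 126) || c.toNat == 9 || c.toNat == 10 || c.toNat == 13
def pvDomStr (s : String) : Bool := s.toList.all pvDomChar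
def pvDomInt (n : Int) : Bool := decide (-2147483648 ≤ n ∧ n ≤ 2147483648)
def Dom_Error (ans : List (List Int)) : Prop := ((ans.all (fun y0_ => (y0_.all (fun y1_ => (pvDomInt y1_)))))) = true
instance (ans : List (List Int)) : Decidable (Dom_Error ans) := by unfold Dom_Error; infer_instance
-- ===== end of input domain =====

-- B counts by complement: it slices ans into its three fixed regions, projects each
-- region onto its expected column, counts the CORRECT entries with list.count(1) and
-- subtracts from len(ans) — no running index, no per-row branch (objective: alternative).

-- ===== PORT A =====
-- single loop with state (num, error); data[k] is ported with pyGet?/getD (Pre_ guarantees the index exists)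
def Error (ans : List (List Int)) : Int :=
  (ans.foldl (fun (s : Int × Int) data =>
      let num := s.1
      let error := s.2
      let error :=
        if num < 100 then
          (if (PySem.List.pyGet? data 0).getD 0 ≠ 1 then error + 1 else error)
        else if num < 200 then
          (if (PySem.List.pyGet? data 1).getD 0 ≠ 1 then error + 1 else error)
        else
          (if (PySem.List.pyGet? data 2).getD 0 ≠ 1 then error + 1 else error)
      (num + 1, error)) ((0 : Int), (0 : Int))).2

-- ===== PORT B =====
-- wrong = len(ans); for col, block in enumerate((ans[:100], ans[100:200], ans[200:])): wrong -= [row[col] for row in block].count(1)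
def Error_alt (ans : List (List Int)) : Int :=
  (PySem.List.enumerate
      [PySem.List.slice ans none (some 100),
       PySem.List.slice ans (some 100) (some 200),
       PySem.List.slice ans (some 200) none]).foldl
    (fun wrong cb =>
      wrong - ((cb.2.map (fun row => (PySem.List.pyGet? row cb.1).getD 0)).count 1 : Int))
    ((ans.length : Int))

-- ===== PRECONDITION & SPEC =====
-- Pre_ excludes exactly the inputs where Python A raises IndexError: a row in the
-- first 100 must have length ≥ 1, rows 100..199 length ≥ 2, rows from 200 length ≥ 3.
def Pre_Error (ans : List (List Int)) : Prop :=
  ∀ p ∈ ans.zipIdx, (if p.2 < 100 then 1 else if p.2 < 200 then 2 else 3) ≤ p.1.length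
instance (ans : List (List Int)) : Decidable (Pre_Error ans) := by unfold Pre_Error; infer_instance

def pvWitness_Error : List (List Int) := [[1, 0, 0], [2], [1]]

def Spec_Error (ans : List (List Int)) (out : Int) : Prop := out = Error_alt ans
instance (ans : List (List Int)) (out : Int) : Decidable (Spec_Error ans out) := by unfold Spec_Error; infer_instance

-- ===== CLAIM (what is proved, stated in full; the proofs are below) =====
def Claim_equal_Error : Prop := ∀ (ans : List (List Int)), Dom_Error ans → Pre_Error ans → Spec_Error ans (Error ans)

-- ===== LEMMAS AND PROOFS =====

-- whether row d at index n counts as an error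
def pvBad (n : Nat) (d : List Int) : Bool :=
  (PySem.List.pyGet? d (if n < 100 then 0 else if n < 200 then 1 else 2)).getD 0 ≠ 1

-- number of erroneous rows in a region whose expected column is j
def pvCount (j : Int) (l : List (List Int)) : Int :=
  ((l.filter (fun d => (PySem.List.pyGet? d j).getD 0 ≠ 1)).length : Int)

-- index-carrying reference count
def pvCntFrom (n : Nat) : List (List Int) → Int
  | [] => 0
  | d :: rest => (if pvBad n d then 1 else 0) + pvCntFrom (n + 1) rest

-- A's fold equals the reference count
theorem pvFoldA (ans : List (List Int)) : ∀ (n : Nat) (e : Int),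
    (ans.foldl (fun (s : Int × Int) data =>
      let num := s.1
      let error := s.2
      let error :=
        if num < 100 then
          (if (PySem.List.pyGet? data 0).getD 0 ≠ 1 then error + 1 else error)
        else if num < 200 then
          (if (PySem.List.pyGet? data 1).getD 0 ≠ 1 then error + 1 else error)
        else
          (if (PySem.List.pyGet? data 2).getD 0 ≠ 1 then error + 1 else error)
      (num + 1, error)) ((n : Int), e)).2 = e + pvCntFrom n ans := by
  induction ans with
  | nil => intro n e; simp [pvCntFrom]
  | cons d rest ih =>
    intro n e
    have h1 : ((n : Int) < 100) = (n < 100) := by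
      by_cases h : n < 100 <;> simp [h]
    have h2 : ((n : Int) < 200) = (n < 200) := by
      by_cases h : n < 200 <;> simp [h]
    have hn : ((n : Int) + 1) = ((n + 1 : Nat) : Int) := by push_cast; ring
    simp only [List.foldl_cons, pvCntFrom, pvBad, decide_eq_true_eq]
    rw [hn]
    by_cases ha : n < 100
    · simp only [h1, h2, ha, if_pos, ih]
      split_ifs <;> ring
    · by_cases hb : n < 200
      · simp only [h1, h2, ha, hb, if_false, if_true, ih]
        split_ifs <;> ring
      · simp only [h1, h2, ha, hb, if_false, ih]
        split_ifs <;> ring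

-- split the reference count at any point
theorem pvCntFrom_split (l : List (List Int)) : ∀ (n k : Nat),
    pvCntFrom n l = pvCntFrom n (l.take k) + pvCntFrom (n + k) (l.drop k) := by
  induction l with
  | nil => intro n k; simp [pvCntFrom]
  | cons d rest ih =>
    intro n k
    cases k with
    | zero => simp [pvCntFrom]
    | succ k =>
      simp only [List.take_succ_cons, List.drop_succ_cons, pvCntFrom]
      rw [ih (n + 1) k]
      have : n + 1 + k = n + (k + 1) := by omega
      rw [this]; ring

-- on a region where the branch is constant, the reference count is a plain filter count
theorem pvCntFrom_const (l : List (List Int)) : ∀ (n : Nat) (j : Int),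
    (∀ m : Nat, m < l.length → (if n + m < 100 then (0:Int) else if n + m < 200 then 1 else 2) = j) →
    pvCntFrom n l = pvCount j l := by
  induction l with
  | nil => intro n j _; simp [pvCntFrom, pvCount]
  | cons d rest ih =>
    intro n j h
    have h0 := h 0 (by simp)
    simp only [Nat.add_zero] at h0
    have hrest : ∀ m : Nat, m < rest.length →
        (if n + 1 + m < 100 then (0:Int) else if n + 1 + m < 200 then 1 else 2) = j := by
      intro m hm
      have := h (m + 1) (by simp; omega)
      have e : n + (m + 1) = n + 1 + m := by omega
      rwa [e] at this
    simp only [pvCntFrom, pvCount, List.filter_cons, pvBad, ih (n+1) j hrest, h0]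
    by_cases hb : (PySem.List.pyGet? d j).getD 0 = 1
    · simp [hb]
    · simp [hb]
      ring

-- B's complement count over one region equals the filter count of errors there
theorem pvComplement (j : Int) (l : List (List Int)) :
    (l.length : Int) - ((l.map (fun row => (PySem.List.pyGet? row j).getD 0)).count 1 : Int)
      = pvCount j l := by
  induction l with
  | nil => simp [pvCount]
  | cons d rest ih =>
    simp only [pvCount, List.filter_cons, List.length_cons, List.map_cons,
      List.count_cons, ne_eq, decide_not] at ih ⊢
    by_cases hb : (PySem.List.pyGet? d j).getD 0 = 1
    · simp only [hb, decide_true, Bool.not_true, beq_self_eq_true, if_true]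
      push_cast at ih ⊢
      omega
    · have hbq : ((PySem.List.pyGet? d j).getD 0 == 1) = false := by simpa using hb
      simp only [hb, hbq, decide_false, Bool.not_false, if_true, List.length_cons]
      push_cast at ih ⊢
      omega

theorem pvB_eq (ans : List (List Int)) : Error_alt ans = pvCntFrom 0 ans := by
  have hsl1 : PySem.List.slice ans none (some 100) = ans.take 100 := by
    exact_mod_cast PySem.List.slice_to_natCast ans 100
  have hsl2 : PySem.List.slice ans (some 100) (some 200) = (ans.drop 100).take 100 := by
    have := PySem.List.slice_natCast ans 100 200
    simpa using this
  have hsl3 : PySem.List.slice ans (some 200) none = ans.drop 200 := by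
    exact_mod_cast PySem.List.slice_from_natCast ans 200
  have s1 := pvCntFrom_split ans 0 100
  have s2 := pvCntFrom_split (ans.drop 100) 100 100
  have hdd : (ans.drop 100).drop 100 = ans.drop 200 := by
    rw [List.drop_drop]
  rw [hdd] at s2
  have c1 : pvCntFrom 0 (ans.take 100) = pvCount 0 (ans.take 100) := by
    apply pvCntFrom_const
    intro m hm
    have := List.length_take_le 100 ans
    have : m < 100 := by omega
    simp [this]
  have c2 : pvCntFrom 100 ((ans.drop 100).take 100) = pvCount 1 ((ans.drop 100).take 100) := by
    apply pvCntFrom_const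
    intro m hm
    have := List.length_take_le 100 (ans.drop 100)
    have h1 : ¬ (100 + m < 100) := by omega
    have h2 : 100 + m < 200 := by omega
    simp [h1, h2]
  have c3 : pvCntFrom 200 (ans.drop 200) = pvCount 2 (ans.drop 200) := by
    apply pvCntFrom_const
    intro m _
    have h1 : ¬ (200 + m < 100) := by omega
    have h2 : ¬ (200 + m < 200) := by omega
    simp [h1, h2]
  have hlen : (ans.length : Int)
      = ((ans.take 100).length : Int) + (((ans.drop 100).take 100).length : Int)
        + ((ans.drop 200).length : Int) := by
    have l1 := List.length_take_le 100 ans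
    have l2 : (ans.drop 100).length = ans.length - 100 := List.length_drop ..
    have l3 : (ans.drop 200).length = ans.length - 200 := List.length_drop ..
    have l4 : ((ans.drop 100).take 100).length = min 100 (ans.drop 100).length :=
      List.length_take ..
    have l5 : (ans.take 100).length = min 100 ans.length := List.length_take ..
    push_cast [l5, l4, l2, l3]
    omega
  simp only [Error_alt, hsl1, hsl2, hsl3, PySem.List.enumerate, List.foldl_cons,
    List.foldl_nil]
  norm_num
  simp only [← List.map_take, ← List.map_drop]
  rw [hlen, s1, s2, c1, c2, c3]
  rw [← pvComplement 0 (ans.take 100), ← pvComplement 1 ((ans.drop 100).take 100),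
    ← pvComplement 2 (ans.drop 200)]
  ring

-- ===== VERDICT (by name: the statement is the Claim_ definition above) =====
theorem Error_spec : Claim_equal_Error := by
  intro ans _ _
  unfold Spec_Error Error
  rw [pvB_eq ans]
  have := pvFoldA ans 0 0
  simpa using this
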